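-- pv_equiv track=rewrite | github.com/tehyoyee/baekjoon | 1074.py | f
-- ===== SOURCE A (Python) =====
-- def f(l, r, c, lst):
-- 	temp = 0
-- 	if r < l:
-- 		if c < l:
-- 			temp = 0
-- 		else:
-- 			temp = 1
-- 			c -= l
-- 	else:
-- 		r -= l
-- 		if c < l:
-- 			temp = 2
-- 		else:
-- 			temp = 3
-- 			c -= l
-- 	lst.append(temp)
-- 	if l == 1:
-- 		return lst
-- 	else:
-- 		return f(l // 2, r, c, lst)
-- ===== SOURCE B (Python) =====
-- def f(l, r, c, lst):
--     levels = []
--     d = l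
--     while d >= 1:
--         levels.append(d)
--         d //= 2
--     for d in levels:
--         hi = r >= d
--         hj = c >= d
--         lst.append(2 * hi + hj)
--         r -= d * hi
--         c -= d * hj
--     return lst
-- ===== Notes on version B (the rewrite author's own statement) =====
-- stated objective: alternative
-- what changed: Replaces A's recursion (choose quadrant, append, recurse on l//2) by first computing the halving sequence of sizes and then folding a single branch-free arithmetic step temp = 2*(r>=d) + (c>=d) over it.
import Mathlib
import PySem

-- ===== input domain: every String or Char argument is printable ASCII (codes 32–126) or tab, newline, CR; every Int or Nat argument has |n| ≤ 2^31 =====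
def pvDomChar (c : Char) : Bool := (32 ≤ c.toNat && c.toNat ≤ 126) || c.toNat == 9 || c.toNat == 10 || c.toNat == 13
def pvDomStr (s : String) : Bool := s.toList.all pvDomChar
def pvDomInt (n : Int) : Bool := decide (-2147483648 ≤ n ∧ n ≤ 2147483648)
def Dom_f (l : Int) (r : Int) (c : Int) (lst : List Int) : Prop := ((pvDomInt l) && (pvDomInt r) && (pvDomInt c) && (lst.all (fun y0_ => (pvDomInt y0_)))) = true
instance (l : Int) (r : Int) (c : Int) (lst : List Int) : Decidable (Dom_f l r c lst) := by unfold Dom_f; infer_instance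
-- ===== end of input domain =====

-- B replaces A's quadrant recursion by first computing the halving sequence of sizes,
-- then folding one arithmetic step (temp = 2*[r≥d] + [c≥d]) over it; equivalence is about
-- the RETURN value (Python A and B both append to the passed-in lst in place).

-- ===== PORT A =====
-- fuel = l.toNat is only a termination device: for l ≥ 1 (the Pre_) it never runs out,
-- since l strictly decreases at each recursive call; for l ≤ 0 Python A raises RecursionError.
def fAux : Nat → Int → Int → Int → List Int → List Int
  | fuel, l, r, c, lst =>
    let trc : Int × Int × Int :=
      if r < l then
        if c < l then (0, r, c) else (1, r, c - l)
      else
        if c < l then (2, r - l, c) else (3, r - l, c - l)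
    let lst' := lst ++ [trc.1]
    if l = 1 then lst'
    else
      match fuel with
      | 0 => lst'  -- unreachable under Pre_f
      | fuel + 1 => fAux fuel (PySem.Int.floordiv l 2) trc.2.1 trc.2.2 lst'

def f (l : Int) (r : Int) (c : Int) (lst : List Int) : List Int :=
  fAux l.toNat l r c lst

-- ===== PORT B =====
def levelsB (l : Int) : List Int :=
  if h : 1 ≤ l then l :: levelsB (PySem.Int.floordiv l 2) else []
termination_by l.toNat
decreasing_by
  rw [PySem.Int.floordiv_eq_ediv_of_pos (by norm_num)]
  omega

def stepB (st : Int × Int × List Int) (d : Int) : Int × Int × List Int :=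
  let hi : Int := if d ≤ st.1 then 1 else 0
  let hj : Int := if d ≤ st.2.1 then 1 else 0
  (st.1 - d * hi, st.2.1 - d * hj, st.2.2 ++ [2 * hi + hj])

def f_alt (l : Int) (r : Int) (c : Int) (lst : List Int) : List Int :=
  ((levelsB l).foldl stepB (r, c, lst)).2.2

-- ===== PRECONDITION & SPEC =====
-- Pre_f excludes l ≤ 0, on which Python A never returns (RecursionError).
def Pre_f (l : Int) (r : Int) (c : Int) (lst : List Int) : Prop := 1 ≤ l
instance (l : Int) (r : Int) (c : Int) (lst : List Int) : Decidable (Pre_f l r c lst) := by unfold Pre_f; infer_instance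
def pvWitness_f : Int × Int × Int × List Int := (4, 2, 3, [7])

def Spec_f (l : Int) (r : Int) (c : Int) (lst : List Int) (out : List Int) : Prop := out = f_alt l r c lst
instance (l : Int) (r : Int) (c : Int) (lst : List Int) (out : List Int) : Decidable (Spec_f l r c lst out) := by unfold Spec_f; infer_instance

-- ===== CLAIM (what is proved, stated in full; the proofs are below) =====
def Claim_equal_f : Prop := ∀ (l : Int) (r : Int) (c : Int) (lst : List Int), Dom_f l r c lst → Pre_f l r c lst → Spec_f l r c lst (f l r c lst)

-- ===== LEMMAS AND PROOFS =====
lemma levelsB_cons (l : Int) (h : 1 ≤ l) :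
    levelsB l = l :: levelsB (PySem.Int.floordiv l 2) := by
  rw [levelsB]; simp [h]

lemma levelsB_nil (l : Int) (h : l ≤ 0) : levelsB l = [] := by
  rw [levelsB]; simp; omega

lemma stepB_spec (r c l : Int) (lst : List Int) :
    stepB (r, c, lst) l =
      (if r < l then
         if c < l then (r, c, lst ++ [0]) else (r, c - l, lst ++ [1])
       else
         if c < l then (r - l, c, lst ++ [2]) else (r - l, c - l, lst ++ [3])) := by
  unfold stepB
  dsimp only
  split_ifs <;> first
    | (exfalso; omega)
    | (simp; omega)
    | simp

lemma fAux_eq_fold (fuel : Nat) :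
    ∀ (l r c : Int) (lst : List Int), 1 ≤ l → l.toNat ≤ fuel →
      fAux fuel l r c lst = ((levelsB l).foldl stepB (r, c, lst)).2.2 := by
  induction fuel with
  | zero => intro l r c lst hl hf; omega
  | succ fuel ih =>
    intro l r c lst hl hf
    have hfd : PySem.Int.floordiv l 2 = l / 2 :=
      PySem.Int.floordiv_eq_ediv_of_pos (by norm_num)
    rw [levelsB_cons l hl, List.foldl_cons, stepB_spec, hfd]
    by_cases h1 : l = 1
    · subst h1
      rw [levelsB_nil ((1 : Int) / 2) (by norm_num), List.foldl_nil, fAux]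
      split_ifs <;> first | rfl | (exfalso; omega)
    · have hl2 : 1 ≤ l / 2 := by omega
      have hfl : (l / 2).toNat ≤ fuel := by omega
      rw [fAux]
      simp only [hfd, if_neg h1]
      split_ifs <;> exact ih _ _ _ _ hl2 hfl

-- ===== VERDICT (by name: the statement is the Claim_ definition above) =====
theorem f_spec : Claim_equal_f := by
  intro l r c lst _ hpre
  unfold Spec_f f f_alt
  exact fAux_eq_fold l.toNat l r c lst hpre (le_refl _)
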